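-- pv_equiv track=rewrite | github.com/sceprum/code2name | src/parsing.py | count_backslashes
-- ===== SOURCE A (Python) =====
-- def count_backslashes(text, end_pos):
--     if end_pos >= len(text):
--         return 0
--     count = 0
--     for p in range(end_pos, -1, -1):
--         if text[p] != '\\':
--             return count
--         count += 1
--     return count
-- ===== SOURCE B (Python) =====
-- def count_backslashes(text, end_pos):
--     if end_pos >= len(text) or end_pos < 0:
--         return 0
--     s = text[:end_pos + 1]
--     return len(s) - len(s.rstrip('\\'))
-- ===== Notes on version B (the rewrite author's own statement) =====
-- stated objective: simpler
-- what changed: Replaces the explicit backward char-by-char counting loop with a slice-then-measure decomposition: take the prefix ending at end_pos and return len(prefix) - len(prefix.rstrip('\')).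
import Mathlib
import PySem

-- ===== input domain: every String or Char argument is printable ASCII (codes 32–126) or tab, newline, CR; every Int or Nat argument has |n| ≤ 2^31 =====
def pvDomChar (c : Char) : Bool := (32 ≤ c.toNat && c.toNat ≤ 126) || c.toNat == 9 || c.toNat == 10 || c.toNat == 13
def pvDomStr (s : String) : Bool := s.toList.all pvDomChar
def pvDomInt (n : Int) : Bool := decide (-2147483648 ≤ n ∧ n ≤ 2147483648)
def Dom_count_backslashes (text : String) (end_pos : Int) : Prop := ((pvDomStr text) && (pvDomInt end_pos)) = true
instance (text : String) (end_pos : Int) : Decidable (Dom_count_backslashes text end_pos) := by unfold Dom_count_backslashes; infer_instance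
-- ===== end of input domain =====

-- B replaces A's backward char-by-char counting loop with a slice-then-measure
-- decomposition (len(prefix) - len(prefix.rstrip('\\'))); objective: simpler.


-- ===== PORT A =====
-- the for-loop over range(end_pos, -1, -1) with its early return, state = count
def cbLoopA (cs : List Char) (ps : List Int) (count : Int) : Int :=
  match ps with
  | [] => count
  | p :: rest =>
      if PySem.List.pyGetD cs p ' ' ≠ '\\' then count
      else cbLoopA cs rest (count + 1)

def count_backslashes (text : String) (end_pos : Int) : Int :=
  if end_pos ≥ PySem.Str.len text then 0
  else cbLoopA text.toList (PySem.List.pyRange end_pos (-1) (-1)) 0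

-- ===== PORT B =====
-- hand port of s.rstrip('\\') for the single strip-char '\\': drop trailing backslashes (exact)
def rstripBackslashes (cs : List Char) : List Char :=
  (cs.reverse.dropWhile (· == '\\')).reverse

def count_backslashes_alt (text : String) (end_pos : Int) : Int :=
  if end_pos ≥ PySem.Str.len text ∨ end_pos < 0 then 0
  else
    let s := PySem.List.slice text.toList none (some (end_pos + 1))
    (s.length : Int) - ((rstripBackslashes s).length : Int)

-- ===== PRECONDITION & SPEC =====
def Spec_count_backslashes (text : String) (end_pos : Int) (out : Int) : Prop := out = count_backslashes_alt text end_pos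
instance (text : String) (end_pos : Int) (out : Int) : Decidable (Spec_count_backslashes text end_pos out) := by unfold Spec_count_backslashes; infer_instance

-- ===== CLAIM (what is proved, stated in full; the proofs are below) =====
def Claim_equal_count_backslashes : Prop := ∀ (text : String) (end_pos : Int), Dom_count_backslashes text end_pos → Spec_count_backslashes text end_pos (count_backslashes text end_pos)

-- ===== LEMMAS AND PROOFS =====

-- The backward scan starting at index n counts the trailing backslashes of the
-- prefix of length n+1, i.e. the takeWhile-run on its reverse.
theorem cbLoopA_eq_takeWhile (cs : List Char) (n : Nat) (c : Int) (h : n < cs.length) :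
    cbLoopA cs (PySem.List.pyRange (n : Int) (-1) (-1)) c
      = c + (((cs.take (n + 1)).reverse.takeWhile (· == '\\')).length : Int) := by
  induction n generalizing c with
  | zero =>
      rw [PySem.List.pyRange_neg_one_cons (by omega), PySem.List.pyRange_neg_one_eq_nil (by omega)]
      simp only [cbLoopA]
      rw [PySem.List.pyGetD_natCast]
      have hget : cs[0]? = some cs[0] := List.getElem?_eq_getElem h
      have htake : (cs.take 1).reverse = [cs[0]] := by
        rcases cs with _ | ⟨x, xs⟩
        · simp at h
        · simp
      rw [htake]
      by_cases hx : cs[0] = '\\'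
      · rw [if_neg (by simp [List.getD, hget, hx])]
        simp [hx]
      · rw [if_pos (by simp [List.getD, hget, hx])]
        simp [hx]
  | succ m ih =>
      rw [PySem.List.pyRange_neg_one_cons (by omega)]
      simp only [cbLoopA]
      rw [PySem.List.pyGetD_natCast]
      have hm : m < cs.length := by omega
      have hget : cs[m + 1]? = some cs[m + 1] := List.getElem?_eq_getElem h
      have htake : (cs.take (m + 1 + 1)).reverse = cs[m + 1] :: (cs.take (m + 1)).reverse := by
        rw [List.take_add_one, List.reverse_append]
        simp [List.getElem?_eq_getElem h]
      have hcast : ((m + 1 : Nat) : Int) - 1 = ((m : Nat) : Int) := by push_cast; ring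
      by_cases hx : cs[m + 1] = '\\'
      · rw [if_neg (by simp [List.getD, hget, hx]), hcast, ih (c + 1) hm, htake]
        simp [hx]
        ring
      · rw [if_pos (by simp [List.getD, hget, hx]), htake]
        simp [hx]

-- length of dropWhile's complement: |xs| - |dropWhile p xs| = |takeWhile p xs|
theorem length_sub_dropWhile (p : Char → Bool) (xs : List Char) :
    (xs.length : Int) - ((xs.dropWhile p).length : Int) = ((xs.takeWhile p).length : Int) := by
  have := congrArg List.length (List.takeWhile_append_dropWhile (p := p) (l := xs))
  simp only [List.length_append] at this
  omega

-- ===== VERDICT (by name: the statement is the Claim_ definition above) =====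
theorem count_backslashes_spec : Claim_equal_count_backslashes := by
  intro text end_pos _
  unfold Spec_count_backslashes count_backslashes count_backslashes_alt
  by_cases hge : end_pos ≥ PySem.Str.len text
  · rw [if_pos hge, if_pos (Or.inl hge)]
  · rw [if_neg hge]
    by_cases hneg : end_pos < 0
    · rw [if_pos (Or.inr hneg), PySem.List.pyRange_neg_one_eq_nil (by omega)]
      rfl
    · rw [if_neg (by tauto)]
      have h0 : (0 : Int) ≤ end_pos := by omega
      have hlen : end_pos < (text.toList.length : Int) := by
        simpa [PySem.Str.len, PySem.Chars.len] using lt_of_not_ge hge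
      set n := end_pos.toNat with hn
      have hcast : (n : Int) = end_pos := Int.toNat_of_nonneg h0
      have hnlt : n < text.toList.length := by omega
      rw [← hcast, cbLoopA_eq_takeWhile text.toList n 0 hnlt]
      have hslice : PySem.List.slice text.toList none (some ((n : Int) + 1))
          = text.toList.take (n + 1) := by
        have : ((n : Int) + 1) = ((n + 1 : Nat) : Int) := by push_cast; ring
        rw [this, PySem.List.slice_to_natCast]
      simp only [hslice, rstripBackslashes, List.length_reverse]
      have hlw := length_sub_dropWhile (· == '\\') ((text.toList.take (n + 1)).reverse)
      rw [List.length_reverse] at hlw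
      omega
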